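-- pv_equiv track=rewrite | github.com/keithwissing/adventofcode | 2024/day19.py | possibles
-- ===== SOURCE A (Python) =====
-- import functools
--
-- def possibles(design, towels):
--     @functools.cache
--     def can(design):
--         total = 0
--         for t in towels:
--             if design == t:
--                 total += 1
--             if design.startswith(t):
--                 total += can(design[len(t):])
--         return total
--
--     return can(design)
-- ===== SOURCE B (Python) =====
-- def possibles(design, towels):
--     n = len(design)
--     dp = [0] * (n + 1)
--     for i in range(n - 1, -1, -1):
--         for t in towels:
--             L = len(t)
--             if design[i:i + L] == t:
--                 dp[i] += 1 if i + L == n else dp[i + L]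
--     return dp[0]
-- ===== Notes on version B (the rewrite author's own statement) =====
-- stated objective: alternative
-- what changed: Replaces the functools.cache top-down recursion with an explicit bottom-up DP table dp[i] = number of ways to compose design[i:], filled right-to-left, avoiding recursion entirely.
import Mathlib
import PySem

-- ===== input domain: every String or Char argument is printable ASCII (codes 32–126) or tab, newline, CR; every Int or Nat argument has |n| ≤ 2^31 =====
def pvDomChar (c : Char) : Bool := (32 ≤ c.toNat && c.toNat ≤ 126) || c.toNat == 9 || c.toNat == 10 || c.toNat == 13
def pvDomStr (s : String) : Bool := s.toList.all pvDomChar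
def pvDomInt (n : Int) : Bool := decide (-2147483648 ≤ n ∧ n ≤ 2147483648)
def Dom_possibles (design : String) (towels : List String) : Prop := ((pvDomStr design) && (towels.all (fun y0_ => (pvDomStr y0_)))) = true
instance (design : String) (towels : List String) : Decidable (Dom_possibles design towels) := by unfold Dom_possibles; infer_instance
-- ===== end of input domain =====

-- B replaces the functools.cache top-down recursion with an explicit bottom-up DP table (alternative decomposition, same cost).


-- ===== PORT A =====
-- can(design): for each towel t, +1 if design == t, and + can(design[len(t):]) if design startswith t.
-- The recursion is total in Lean via a fuel argument; with no empty towel (Pre_) every recursive call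
-- strictly shortens the design, so fuel = len(design)+1 always suffices and the fuel-0 branch is dead.
def canA (towels : List String) : Nat → List Char → Int
  | 0, _ => 0
  | fuel + 1, d =>
    towels.foldl (fun total t =>
      let total := if d = t.toList then total + 1 else total
      if t.toList.isPrefixOf d then total + canA towels fuel (d.drop t.toList.length)
      else total) 0

def possibles (design : String) (towels : List String) : Int :=
  canA towels (design.toList.length + 1) design.toList

-- ===== PORT B =====
-- dp[i] counts ways to compose design[i:]; filled for i = n-1 … 0.  design[i:i+L] is ported as
-- (drop i).take L, exact here since 0 ≤ i < n; range(n-1,-1,-1) is (List.range n).reverse.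
def possibles_alt (design : String) (towels : List String) : Int :=
  let d := design.toList
  let n := d.length
  let dp0 : List Int := List.replicate (n + 1) 0
  let dp := (List.range n).reverse.foldl (fun dp i =>
      towels.foldl (fun dp t =>
        let L := t.toList.length
        if (d.drop i).take L = t.toList then
          dp.set i (dp.getD i 0 + (if i + L = n then 1 else dp.getD (i + L) 0))
        else dp) dp) dp0
  dp.getD 0 0

-- ===== PRECONDITION & SPEC =====
-- Pre_ excludes an empty towel string, on which Python A hits unbounded recursion (RecursionError): it never returns.
def Pre_possibles (design : String) (towels : List String) : Prop := "" ∉ towels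
instance (design : String) (towels : List String) : Decidable (Pre_possibles design towels) := by unfold Pre_possibles; infer_instance

def pvWitness_possibles : String × List String := ("abrwrr", ["ab", "r", "wr", "b"])

def Spec_possibles (design : String) (towels : List String) (out : Int) : Prop := out = possibles_alt design towels
instance (design : String) (towels : List String) (out : Int) : Decidable (Spec_possibles design towels out) := by unfold Spec_possibles; infer_instance

-- ===== CLAIM (what is proved, stated in full; the proofs are below) =====
def Claim_equal_possibles : Prop := ∀ (design : String) (towels : List String), Dom_possibles design towels → Pre_possibles design towels → Spec_possibles design towels (possibles design towels)

-- ===== LEMMAS AND PROOFS =====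

theorem foldl_congr_mem' {α β : Type} (l : List α) (f g : β → α → β) (init : β)
    (h : ∀ acc x, x ∈ l → f acc x = g acc x) : l.foldl f init = l.foldl g init := by
  induction l generalizing init with
  | nil => rfl
  | cons a l ih =>
    simp only [List.foldl_cons]
    rw [h init a (by simp)]
    exact ih _ (fun acc x hx => h acc x (by simp [hx]))

-- fuel irrelevance: with no empty towel, any fuel > length computes the same value
theorem canA_fuel_irrel (towels : List String) (hni : "" ∉ towels) :
    ∀ (m : Nat) (d : List Char) (f1 f2 : Nat), d.length ≤ m → d.length < f1 → d.length < f2 →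
      canA towels f1 d = canA towels f2 d := by
  intro m
  induction m with
  | zero =>
    intro d f1 f2 hm h1 h2
    have hd : d = [] := by
      cases d with
      | nil => rfl
      | cons a l => simp at hm
    subst hd
    obtain ⟨a, f1, rfl⟩ : ∃ a, f1 = a + 1 := ⟨f1 - 1, by omega⟩
    obtain ⟨b, f2, rfl⟩ : ∃ b, f2 = b + 1 := ⟨f2 - 1, by omega⟩
    simp only [canA]
    apply foldl_congr_mem'
    intro acc t ht
    have htne : t ≠ "" := fun h => hni (h ▸ ht)
    have htl : t.toList ≠ [] := by
      intro h
      exact htne (by have := congrArg String.ofList h; simpa using this)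
    have hpre : t.toList.isPrefixOf ([] : List Char) = false := by
      cases h : t.toList.isPrefixOf ([] : List Char)
      · rfl
      · exact absurd (List.prefix_nil.mp (List.isPrefixOf_iff_prefix.mp h)) htl
    simp [hpre]
  | succ m ih =>
    intro d f1 f2 hm h1 h2
    obtain ⟨a, f1, rfl⟩ : ∃ a, f1 = a + 1 := ⟨f1 - 1, by omega⟩
    obtain ⟨b, f2, rfl⟩ : ∃ b, f2 = b + 1 := ⟨f2 - 1, by omega⟩
    simp only [canA]
    apply foldl_congr_mem'
    intro acc t ht
    have htne : t ≠ "" := fun h => hni (h ▸ ht)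
    have htl : t.toList ≠ [] := by
      intro h
      exact htne (by have := congrArg String.ofList h; simpa using this)
    cases hpre : t.toList.isPrefixOf d with
    | false => simp [hpre]
    | true =>
      have hpref : t.toList <+: d := List.isPrefixOf_iff_prefix.mp hpre
      have hlen : 1 ≤ t.toList.length := by
        cases h : t.toList with
        | nil => exact absurd h htl
        | cons c l => simp
      have hle : t.toList.length ≤ d.length := hpref.length_le
      have hrec : (d.drop t.toList.length).length ≤ m := by
        simp only [List.length_drop]; omega
      have := ih (d.drop t.toList.length) a b hrec
        (by simp only [List.length_drop]; omega) (by simp only [List.length_drop]; omega)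
      beta_reduce
      rw [this]

-- the semantic count of decompositions (A's memoized value)
def ways (towels : List String) (d : List Char) : Int := canA towels (d.length + 1) d

theorem foldl_id_of_mem {α β : Type} (l : List α) (f : β → α → β) (init : β)
    (h : ∀ acc x, x ∈ l → f acc x = acc) : l.foldl f init = init := by
  induction l generalizing init with
  | nil => rfl
  | cons a l ih =>
    simp only [List.foldl_cons]
    rw [h init a (by simp)]
    exact ih _ (fun acc x hx => h acc x (by simp [hx]))

theorem canA_nil (towels : List String) (hni : "" ∉ towels) (f : Nat) :
    canA towels f [] = 0 := by
  cases f with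
  | zero => rfl
  | succ f =>
    simp only [canA]
    apply foldl_id_of_mem
    intro acc t ht
    have htne : t ≠ "" := fun h => hni (h ▸ ht)
    have htl : t.toList ≠ [] := by
      intro h
      exact htne (by have := congrArg String.ofList h; simpa using this)
    have hpre : t.toList.isPrefixOf ([] : List Char) = false := by
      cases h : t.toList.isPrefixOf ([] : List Char)
      · rfl
      · exact absurd (List.prefix_nil.mp (List.isPrefixOf_iff_prefix.mp h)) htl
    have hne : ([] : List Char) ≠ t.toList := fun h => htl h.symm
    simp [hpre, hne]

theorem ways_nil (towels : List String) (hni : "" ∉ towels) : ways towels [] = 0 :=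
  canA_nil towels hni 1

-- one unfolding of ways through the recurrence
theorem ways_unfold (towels : List String) (hni : "" ∉ towels) (d : List Char) :
    ways towels d = towels.foldl (fun total t =>
      let total := if d = t.toList then total + 1 else total
      if t.toList.isPrefixOf d then total + ways towels (d.drop t.toList.length)
      else total) 0 := by
  have hw : ways towels d = canA towels (d.length + 1) d := rfl
  rw [hw]
  simp only [canA]
  apply foldl_congr_mem'
  intro acc t ht
  have htne : t ≠ "" := fun h => hni (h ▸ ht)
  have htl : t.toList ≠ [] := by
    intro h
    exact htne (by have := congrArg String.ofList h; simpa using this)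
  cases hpre : t.toList.isPrefixOf d with
  | false => simp [hpre]
  | true =>
    have hpref : t.toList <+: d := List.isPrefixOf_iff_prefix.mp hpre
    have hlen : 1 ≤ t.toList.length := by
      cases h : t.toList with
      | nil => exact absurd h htl
      | cons c l => simp
    have hle : t.toList.length ≤ d.length := hpref.length_le
    have hws : canA towels d.length (d.drop t.toList.length) = ways towels (d.drop t.toList.length) := by
      unfold ways
      exact canA_fuel_irrel towels hni (d.drop t.toList.length).length (d.drop t.toList.length)
        d.length ((d.drop t.toList.length).length + 1) (le_refl _)
        (by simp only [List.length_drop]; omega) (by omega)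
    beta_reduce
    rw [hws]

-- inner loop: folding the towels at index i sets dp[i] to ways (d.drop i) and leaves the rest
theorem inner_fold (towels : List String) (hni : "" ∉ towels) (d : List Char)
    (i : Nat) (hi : i < d.length) :
    ∀ (ts : List String) (dp : List Int), (∀ t ∈ ts, t ∈ towels) → dp.length = d.length + 1 →
      (∀ j, i < j → dp.getD j 0 = ways towels (d.drop j)) →
      (let dp' := ts.foldl (fun dp t =>
          let L := t.toList.length
          if (d.drop i).take L = t.toList then
            dp.set i (dp.getD i 0 + (if i + L = d.length then 1 else dp.getD (i + L) 0))
          else dp) dp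
       dp'.length = d.length + 1 ∧ (∀ j, j ≠ i → dp'.getD j 0 = dp.getD j 0) ∧
       dp'.getD i 0 = ts.foldl (fun total t =>
          let total := if (d.drop i) = t.toList then total + 1 else total
          if t.toList.isPrefixOf (d.drop i) then total + ways towels ((d.drop i).drop t.toList.length)
          else total) (dp.getD i 0)) := by
  intro ts
  induction ts with
  | nil => intro dp _ hlen hup; exact ⟨hlen, fun _ _ => rfl, rfl⟩
  | cons t ts ih =>
    intro dp hmem hlen hup
    have htmem : t ∈ towels := hmem t (by simp)
    have htne : t ≠ "" := fun h => hni (h ▸ htmem)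
    have htl : t.toList ≠ [] := by
      intro h
      exact htne (by have := congrArg String.ofList h; simpa using this)
    have hL1 : 1 ≤ t.toList.length := by
      cases h : t.toList with
      | nil => exact absurd h htl
      | cons c l => simp
    simp only [List.foldl_cons]
    -- analyze the step on dp
    set L := t.toList.length with hLdef
    by_cases hmatch : (d.drop i).take L = t.toList
    · -- matched: prefix holds, and the added value agrees with A's step
      have hpref : t.toList <+: (d.drop i) := ⟨(d.drop i).drop L, by rw [← hmatch]; simp⟩
      have hpreb : t.toList.isPrefixOf (d.drop i) = true := List.isPrefixOf_iff_prefix.mpr hpref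
      have hLle : L ≤ d.length - i := by
        have := hpref.length_le
        simpa [List.length_drop] using this
      have hstep : (if i + L = d.length then (1 : Int) else dp.getD (i + L) 0)
          = (if (d.drop i) = t.toList then (1:Int) else 0) + ways towels ((d.drop i).drop L) := by
        by_cases hend : i + L = d.length
        · have hdrop : (d.drop i).drop L = [] := by
            apply List.eq_nil_of_length_eq_zero
            simp only [List.length_drop]; omega
          have heq : d.drop i = t.toList := by
            have : (d.drop i).length = L := by simp only [List.length_drop]; omega
            rw [← hmatch]
            exact (List.take_of_length_le (by omega)).symm
          rw [hdrop, ways_nil towels hni]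
          simp [hend, heq]
        · have hne : d.drop i ≠ t.toList := by
            intro h
            have : (d.drop i).length = L := by rw [h]
            simp [List.length_drop] at this
            omega
          have := hup (i + L) (by omega)
          have hdd : List.drop L (List.drop i d) = List.drop (i + L) d := by
            rw [List.drop_drop, Nat.add_comm]
          rw [if_neg hend, if_neg hne, hdd, this, zero_add]
        -- end hstep
      have hset := ih (dp.set i (dp.getD i 0 + (if i + L = d.length then 1 else dp.getD (i + L) 0)))
        (fun x hx => hmem x (by simp [hx]))
        (by simp [hlen])
        (by
          intro j hj
          rw [List.getD_eq_getD_getElem?, List.getElem?_set_ne (by omega), ← List.getD_eq_getD_getElem?]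
          exact hup j hj)
      simp only [hmatch, eq_self_iff_true, if_true, ite_true] at hset ⊢
      refine ⟨hset.1, ?_, ?_⟩
      · intro j hj
        rw [hset.2.1 j hj, List.getD_eq_getD_getElem?, List.getElem?_set_ne (fun h => hj h.symm),
          ← List.getD_eq_getD_getElem?]
      · rw [hset.2.2]
        congr 1
        rw [List.getD_eq_getD_getElem?, List.getElem?_set_self (by omega)]
        simp only [Option.getD_some]
        rw [hstep]
        simp only [hpreb, if_true]
        by_cases heq : d.drop i = t.toList <;> simp [heq] <;> ring
    · -- no match: neither side changes the accumulator
      have hnpre : t.toList.isPrefixOf (d.drop i) = false := by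
        cases h : t.toList.isPrefixOf (d.drop i)
        · rfl
        · have hpref : t.toList <+: (d.drop i) := List.isPrefixOf_iff_prefix.mp h
          exact absurd (List.prefix_iff_eq_take.mp hpref).symm hmatch
      have hneq : d.drop i ≠ t.toList := by
        intro h
        exact hmatch (by rw [h]; exact List.take_of_length_le (le_refl _) |>.symm ▸ (by simp [h]))
      have hset := ih dp (fun x hx => hmem x (by simp [hx])) hlen hup
      simp only [hmatch, if_false] at hset ⊢
      refine ⟨hset.1, hset.2.1, ?_⟩
      rw [hset.2.2]
      simp [hnpre, hneq]

-- outer loop invariant, by downward induction on i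
theorem outer_fold (towels : List String) (hni : "" ∉ towels) (d : List Char) :
    ∀ (k : Nat) (i : Nat), i + k = d.length →
      (let dp := ((List.range' i k).reverse).foldl (fun dp i =>
          towels.foldl (fun dp t =>
            let L := t.toList.length
            if (d.drop i).take L = t.toList then
              dp.set i (dp.getD i 0 + (if i + L = d.length then 1 else dp.getD (i + L) 0))
            else dp) dp) (List.replicate (d.length + 1) 0)
       dp.length = d.length + 1 ∧ ∀ j, dp.getD j 0 = if i ≤ j then ways towels (d.drop j) else 0) := by
  intro k
  induction k with
  | zero =>
    intro i hi
    simp only [List.range'_zero, List.reverse_nil, List.foldl_nil]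
    refine ⟨by simp, ?_⟩
    intro j
    by_cases hj : i ≤ j
    · have hdj : d.drop j = [] := List.drop_eq_nil_of_le (by omega)
      rw [if_pos hj, hdj, ways_nil towels hni]
      rcases Nat.lt_or_ge j (d.length + 1) with h | h
      · simp [List.getD_eq_getD_getElem?, List.getElem?_replicate, h]
      · have hn : (List.replicate (d.length + 1) (0 : Int))[j]? = none :=
          List.getElem?_eq_none (by simp only [List.length_replicate]; omega)
        rw [List.getD_eq_getD_getElem?, hn]
        rfl
    · rw [if_neg (by omega)]
      simp [List.getD_eq_getD_getElem?, List.getElem?_replicate, show j < d.length + 1 by omega]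
  | succ k ih =>
    intro i hi
    rw [List.range'_succ, List.reverse_cons, List.foldl_append]
    simp only [List.foldl_cons, List.foldl_nil]
    obtain ⟨hlen, hup⟩ := ih (i + 1) (by omega)
    have hi' : i < d.length := by omega
    have hinner := inner_fold towels hni d i hi' towels _ (fun _ h => h) hlen
      (fun j hj => by rw [hup j, if_pos (by omega)])
    obtain ⟨hlen', hother, hself⟩ := hinner
    refine ⟨hlen', ?_⟩
    intro j
    rcases eq_or_ne j i with rfl | hne
    · have h0 := hup j
      rw [if_neg (by omega)] at h0
      rw [if_pos (le_refl j), hself, h0, ← ways_unfold towels hni (d.drop j)]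
    · rw [hother j hne, hup j]
      by_cases hj : i ≤ j
      · rw [if_pos (by omega), if_pos hj]
      · rw [if_neg (by omega), if_neg (by omega)]

-- ===== VERDICT (by name: the statement is the Claim_ definition above) =====
theorem possibles_spec : Claim_equal_possibles := by
  intro design towels _ hpre
  unfold Spec_possibles possibles possibles_alt
  have h2 := (outer_fold towels hpre design.toList design.toList.length 0 (by omega)).2 0
  rw [if_pos (le_refl 0), List.drop_zero, ← List.range_eq_range'] at h2
  exact h2.symm
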